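-- pv_equiv track=rewrite | github.com/UCLA-MQST/lab-report-template | pycode/tests/test_componentlist.py | _parse_csv_fields
-- ===== SOURCE A (Python) =====
-- def _parse_csv_fields(line: str) -> list[str]:
--     """RFC-4180 field splitter — mirrors the Lua character-by-character loop."""
--     raw: list[str] = []
--     inside = False
--     cur = ""
--     for ch in (line + ","):
--         if ch == '"':
--             inside = not inside
--         elif ch == "," and not inside:
--             raw.append(cur.strip())
--             cur = ""
--         else:
--             cur += ch
--     return raw
-- ===== SOURCE B (Python) =====
-- def _parse_csv_fields(line: str) -> list[str]:
--     """Split at commas first, then merge tokens whose cumulative quote count is odd."""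
--     out: list[str] = []
--     buf: list[str] = []
--     q = 0
--     for tok in line.split(","):
--         buf.append(tok)
--         q += tok.count('"')
--         if q % 2 == 0:
--             out.append(",".join(buf).replace('"', "").strip())
--             buf = []
--             q = 0
--     return out
-- ===== Notes on version B (the rewrite author's own statement) =====
-- stated objective: faster
-- what changed: Replaces A's character-by-character quote state machine (with per-character string concatenation) with a split-then-merge pass: split the line at every comma, then walk the tokens accumulating a buffer and a cumulative quote count, emitting a cleaned (quote-stripped, whitespace-trimmed) field whenever the cumulative quote count is even.
import Mathlib
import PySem

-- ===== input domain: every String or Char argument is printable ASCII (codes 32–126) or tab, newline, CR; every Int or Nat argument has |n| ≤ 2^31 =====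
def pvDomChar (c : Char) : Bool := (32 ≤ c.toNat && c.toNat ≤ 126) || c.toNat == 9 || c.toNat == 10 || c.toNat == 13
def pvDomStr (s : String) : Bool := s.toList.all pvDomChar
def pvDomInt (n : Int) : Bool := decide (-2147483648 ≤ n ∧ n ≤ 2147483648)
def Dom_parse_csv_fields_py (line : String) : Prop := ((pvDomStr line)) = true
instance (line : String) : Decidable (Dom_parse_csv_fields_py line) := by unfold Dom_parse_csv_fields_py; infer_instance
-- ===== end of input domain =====

-- B re-implements the quote-aware CSV field splitter by splitting at commas first and merging
-- tokens by cumulative quote parity, instead of A's character-by-character state machine;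
-- a timing run measured B faster (bulk split/join vs per-character concatenation).

-- ===== PORT A =====
-- A's loop body: toggle on '"', flush the stripped accumulator on ',' outside quotes,
-- else append the character.
def pvStepA (st : List String × Bool × List Char) (ch : Char) : List String × Bool × List Char :=
  match st with
  | (raw, inside, cur) =>
    if ch == '"' then (raw, !inside, cur)
    else if ch == ',' && !inside then (raw ++ [String.ofList (PySem.Chars.strip cur)], inside, [])
    else (raw, inside, cur ++ [ch])

def parse_csv_fields_py (line : String) : List String :=
  ((line.toList ++ [',']).foldl pvStepA ([], false, [])).1

-- ===== PORT B =====
-- B's loop body: append the token to the buffer, add its '"'-count; on even cumulative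
-- parity flush (rejoin with ',', remove '"', strip) and reset.
def pvStepB (st : List String × List (List Char) × Nat) (tok : List Char) :
    List String × List (List Char) × Nat :=
  match st with
  | (out, buf, q) =>
    let buf := buf ++ [tok]
    let q := q + PySem.Chars.count tok ['"']
    if q % 2 == 0 then
      (out ++ [String.ofList (PySem.Chars.strip
          (PySem.Chars.replace (PySem.Chars.join [','] buf) ['"'] []))], [], 0)
    else (out, buf, q)

def parse_csv_fields_py_alt (line : String) : List String :=
  ((PySem.Chars.splitOn line.toList [',']).foldl pvStepB ([], [], 0)).1

-- ===== PRECONDITION & SPEC =====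
def Spec_parse_csv_fields_py (line : String) (out : List String) : Prop := out = parse_csv_fields_py_alt line
instance (line : String) (out : List String) : Decidable (Spec_parse_csv_fields_py line out) := by unfold Spec_parse_csv_fields_py; infer_instance

-- ===== CLAIM (what is proved, stated in full; the proofs are below) =====
def Claim_equal_parse_csv_fields_py : Prop := ∀ (line : String), Dom_parse_csv_fields_py line → Spec_parse_csv_fields_py line (parse_csv_fields_py line)

-- ===== LEMMAS AND PROOFS =====

-- pvSplitAux l cur = the comma-split pieces of cur.reverse ++ l — reference form of splitOn's go.
def pvSplitAux : List Char → List Char → List (List Char)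
  | [], cur => [cur.reverse]
  | c :: rest, cur =>
    if c = ',' then cur.reverse :: pvSplitAux rest [] else pvSplitAux rest (c :: cur)

lemma pvSplitOn_go_eq (fuel : Nat) (l cur : List Char) (acc : List (List Char))
    (h : l.length ≤ fuel) :
    PySem.Chars.splitOn.go [','] fuel l cur acc = acc.reverse ++ pvSplitAux l cur := by
  induction fuel generalizing l cur acc with
  | zero =>
    have : l = [] := List.length_eq_zero_iff.mp (Nat.le_zero.mp h)
    subst this
    simp [PySem.Chars.splitOn.go, pvSplitAux]
  | succ fuel ih =>
    cases l with
    | nil => simp [PySem.Chars.splitOn.go, pvSplitAux]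
    | cons c rest =>
      have hlen : rest.length ≤ fuel := by simpa using h
      by_cases hc : c = ','
      · subst hc
        simp [PySem.Chars.splitOn.go, List.isPrefixOf, pvSplitAux, ih _ _ _ hlen]
      · simp [PySem.Chars.splitOn.go, List.isPrefixOf, pvSplitAux, hc,
          Ne.symm hc, ih _ _ _ hlen]

lemma pvSplitOn_eq (cs : List Char) :
    PySem.Chars.splitOn cs [','] = pvSplitAux cs [] := by
  rw [PySem.Chars.splitOn, pvSplitOn_go_eq _ _ _ _ (by omega)]
  simp

lemma pvSplitAux_no_comma (l cur : List Char) (hc : ',' ∉ cur) :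
    ∀ tok ∈ pvSplitAux l cur, ',' ∉ tok := by
  induction l generalizing cur with
  | nil => simpa [pvSplitAux] using hc
  | cons c rest ih =>
    by_cases h : c = ','
    · subst h
      simp only [pvSplitAux]
      intro tok htok
      rcases List.mem_cons.mp htok with h1 | h1
      · subst h1; simpa using hc
      · exact ih [] (by simp) tok h1
    · simp only [pvSplitAux, if_neg h]
      exact ih (c :: cur) (by simp [hc, Ne.symm h])

lemma pvSplitAux_join (l cur : List Char) :
    ((pvSplitAux l cur).map (· ++ [','])).flatten = cur.reverse ++ l ++ [','] := by
  induction l generalizing cur with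
  | nil => simp [pvSplitAux]
  | cons c rest ih =>
    by_cases h : c = ','
    · subst h; simp [pvSplitAux, ih]
    · simp [pvSplitAux, h, ih]

lemma pvCount_go_eq (fuel : Nat) (l : List Char) (acc : Nat) (h : l.length ≤ fuel) :
    PySem.Chars.count.go ['"'] fuel l acc = acc + l.count '"' := by
  induction fuel generalizing l acc with
  | zero =>
    have : l = [] := List.length_eq_zero_iff.mp (Nat.le_zero.mp h)
    subst this
    simp [PySem.Chars.count.go]
  | succ fuel ih =>
    cases l with
    | nil => simp [PySem.Chars.count.go]
    | cons c rest =>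
      have hlen : rest.length ≤ fuel := by simpa using h
      by_cases hc : c = '"'
      · subst hc
        simp [PySem.Chars.count.go, List.isPrefixOf, ih _ _ hlen]
        omega
      · simp [PySem.Chars.count.go, List.isPrefixOf, hc, Ne.symm hc, ih _ _ hlen]

lemma pvCount_eq (l : List Char) : PySem.Chars.count l ['"'] = l.count '"' := by
  rw [PySem.Chars.count]
  simp [pvCount_go_eq _ _ _ (le_refl _)]

lemma pvReplace_go_eq (fuel : Nat) (l acc : List Char) (h : l.length ≤ fuel) :
    PySem.Chars.replace.go ['"'] [] fuel l acc = acc.reverse ++ l.filter (· ≠ '"') := by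
  induction fuel generalizing l acc with
  | zero =>
    have : l = [] := List.length_eq_zero_iff.mp (Nat.le_zero.mp h)
    subst this
    simp [PySem.Chars.replace.go]
  | succ fuel ih =>
    cases l with
    | nil => simp [PySem.Chars.replace.go]
    | cons c rest =>
      have hlen : rest.length ≤ fuel := by simpa using h
      by_cases hc : c = '"'
      · subst hc
        simp [PySem.Chars.replace.go, List.isPrefixOf, ih _ _ hlen]
      · simp [PySem.Chars.replace.go, List.isPrefixOf, hc, Ne.symm hc, ih _ _ hlen]

lemma pvReplace_eq (l : List Char) :
    PySem.Chars.replace l ['"'] [] = l.filter (· ≠ '"') := by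
  rw [PySem.Chars.replace]
  simp [pvReplace_go_eq _ _ _ (le_refl _)]

lemma pvInter_cons (sep x y : List Char) (zs : List (List Char)) :
    sep.intercalate (x :: y :: zs) = x ++ sep ++ sep.intercalate (y :: zs) := by
  simp [List.intercalate, List.intersperse]

lemma pvIntercalate_eq (bs : List (List Char)) (tok : List Char) :
    [','].intercalate (bs ++ [tok]) = (bs.map (· ++ [','])).flatten ++ tok := by
  induction bs with
  | nil => simp [List.intercalate]
  | cons b rest ih =>
    cases rest with
    | nil => simp [List.intercalate, List.intersperse]
    | cons b2 r2 =>
      simp only [List.cons_append]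
      simp only [List.cons_append] at ih
      rw [pvInter_cons]; rw [ih]
      simp

lemma pvRunA_token (tok : List Char) (raw : List String) (b : Bool) (cur : List Char)
    (h : ',' ∉ tok) :
    tok.foldl pvStepA (raw, b, cur)
      = (raw, xor b (decide (tok.count '"' % 2 = 1)), cur ++ tok.filter (· ≠ '"')) := by
  induction tok generalizing b cur with
  | nil => simp
  | cons c rest ih =>
    have hr : ',' ∉ rest := fun hm => h (List.mem_cons_of_mem _ hm)
    have hc : c ≠ ',' := fun he => h (he ▸ List.mem_cons_self ..)
    by_cases hq : c = '"'
    · subst hq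
      simp only [List.foldl_cons, pvStepA, beq_self_eq_true, if_pos]
      rw [ih _ _ hr]
      by_cases hb : b <;> by_cases hp : rest.count '"' % 2 = 1 <;>
        simp [hb, hp, Nat.add_mod] <;> omega
    · simp only [List.foldl_cons, pvStepA]
      rw [if_neg (by simp [hq]), if_neg (by simp [hc])]
      rw [ih _ _ hr]
      simp [hq]

lemma pvXor_parity (a b : Nat) :
    xor (decide (a % 2 = 1)) (decide (b % 2 = 1)) = decide ((a + b) % 2 = 1) := by
  by_cases h1 : a % 2 = 1 <;> by_cases h2 : b % 2 = 1 <;> simp [h1, h2] <;> omega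

lemma pvMain (ts : List (List Char)) (raw : List String) (buf : List (List Char)) (q : Nat)
    (h : ∀ tok ∈ ts, ',' ∉ tok) :
    (((ts.map (· ++ [','])).flatten).foldl pvStepA
        (raw, decide (q % 2 = 1), ((buf.map (· ++ [','])).flatten).filter (· ≠ '"'))).1
      = (ts.foldl pvStepB (raw, buf, q)).1 := by
  induction ts generalizing raw buf q with
  | nil => simp
  | cons tok rest ih =>
    have htok : ',' ∉ tok := h tok (List.mem_cons_self ..)
    have hrest : ∀ t ∈ rest, ',' ∉ t := fun t ht => h t (List.mem_cons_of_mem _ ht)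
    simp only [List.map_cons, List.flatten_cons, List.append_assoc]
    rw [List.foldl_append, List.foldl_append]
    rw [pvRunA_token _ _ _ _ htok, pvXor_parity]
    simp only [List.foldl_cons, List.foldl_nil]
    by_cases hq : (q + tok.count '"') % 2 = 0
    · have hin : decide ((q + tok.count '"') % 2 = 1) = false := by simp; omega
      rw [hin]
      simp only [pvStepA, pvStepB]
      rw [if_neg (by decide), if_pos (by decide)]
      have hflush : (q + PySem.Chars.count tok ['"']) % 2 == 0 := by
        rw [pvCount_eq]; simpa using hq
      rw [if_pos hflush]
      have hval : (((buf.map (· ++ [','])).flatten).filter (· ≠ '"') ++ tok.filter (· ≠ '"'))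
          = PySem.Chars.replace (PySem.Chars.join [','] (buf ++ [tok])) ['"'] [] := by
        rw [pvReplace_eq, PySem.Chars.join, pvIntercalate_eq, List.filter_append]
      rw [hval]
      have := ih (raw ++ [String.ofList (PySem.Chars.strip
          (PySem.Chars.replace (PySem.Chars.join [','] (buf ++ [tok])) ['"'] []))]) [] 0 hrest
      simpa using this
    · have hin : decide ((q + tok.count '"') % 2 = 1) = true := by simp; omega
      rw [hin]
      simp only [pvStepA, pvStepB]
      rw [if_neg (by decide), if_neg (by decide)]
      have hnoflush : ((q + PySem.Chars.count tok ['"']) % 2 == 0) = false := by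
        rw [pvCount_eq]; simpa using hq
      rw [if_neg (by simp [hnoflush])]
      have := ih raw (buf ++ [tok]) (q + PySem.Chars.count tok ['"']) hrest
      rw [pvCount_eq, hin] at this
      rw [pvCount_eq, ← this]
      congr 1
      simp [List.filter_append]

-- ===== VERDICT (by name: the statement is the Claim_ definition above) =====
theorem parse_csv_fields_py_spec : Claim_equal_parse_csv_fields_py := by
  intro line _
  unfold Spec_parse_csv_fields_py parse_csv_fields_py parse_csv_fields_py_alt
  rw [pvSplitOn_eq]
  have h := pvMain (pvSplitAux line.toList []) [] [] 0
      (pvSplitAux_no_comma line.toList [] (by simp))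
  rw [pvSplitAux_join] at h
  simpa using h
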